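-- pv_equiv track=rewrite | github.com/macminilg702-commits/Masters-Pool-Intelligence- | app.py | _flag_badges
-- ===== SOURCE A (Python) =====
-- def _flag_badges(flags_str: str, chalk: bool = False) -> str:
--     """Show only the highest-priority flag + '+N more' indicator.
--     Priority order: Injury/Concern > stat threshold flags > CHALK > DNA gap flags.
--     """
--     # Human-readable short labels for known flag keys
--     _LABEL_MAP: dict[str, str] = {
--         "SG App < +0.84":   "APPROACH",
--         "SG App < +0":      "APPROACH",
--         "SG OTT < +0.60":   "OFF TEE",
--         "SG OTT < +0":      "OFF TEE",
--         "SG Total < +0.67": "SG TOTAL",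
--         "Rank > 25":        "WORLD RANK",
--         "< 4 Career":       "FEW WINS",
--         "< 4 CAREER":       "FEW WINS",
--         "No Tune-Up":       "TUNE-UP",
--         "NO TUNE-UP":       "TUNE-UP",
--         "DNA/FORM GAP":     "DNA/FORM GAP",
--     }
--
--     STAT_FLAGS = {"Rank > 25", "SG Total < +0.67", "SG App < +0.84", "SG OTT < +0.60",
--                   "SG App < +0", "SG OTT < +0"}
--
--     # Collect all flags in priority order
--     all_flags: list[tuple[int, str, str]] = []  # (priority, css_class, display_label)
--
--     if flags_str:
--         for f in flags_str.split(";"):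
--             f = f.strip()
--             if not f:
--                 continue
--             display = _LABEL_MAP.get(f, f)
--             if "Injury" in f or "Concern" in f:
--                 all_flags.append((0, "br", display))
--             elif f in STAT_FLAGS or any(k in f for k in ("SG App", "SG OTT", "SG Total", "Rank >")):
--                 display = _LABEL_MAP.get(f, (f[:11] + "..") if len(f) > 13 else f)
--                 all_flags.append((1, "br", display))
--             else:
--                 # Truncate anything still long
--                 if len(display) > 13:
--                     display = display[:11] + ".."
--                 all_flags.append((3, "ba", display))
--
--     if chalk:
--         all_flags.append((2, "ba", "CHALK"))
--
--     if not all_flags: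
--         return ""
--
--     # Sort by priority (lowest number = highest priority)
--     all_flags.sort(key=lambda x: x[0])
--
--     _, cls, label = all_flags[0]
--     out = f'<span class="badge {cls}">{label}</span>'
--
--     extras = len(all_flags) - 1
--     if extras > 0:
--         out += f'<span class="badge bg">+{extras}</span>'
--
--     return out
-- ===== SOURCE B (Python) =====
-- _LABEL_MAP = {
--     "SG App < +0.84":   "APPROACH",
--     "SG App < +0":      "APPROACH",
--     "SG OTT < +0.60":   "OFF TEE",
--     "SG OTT < +0":      "OFF TEE",
--     "SG Total < +0.67": "SG TOTAL",
--     "Rank > 25":        "WORLD RANK",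
--     "< 4 Career":       "FEW WINS",
--     "< 4 CAREER":       "FEW WINS",
--     "No Tune-Up":       "TUNE-UP",
--     "NO TUNE-UP":       "TUNE-UP",
--     "DNA/FORM GAP":     "DNA/FORM GAP",
-- }
--
-- _STAT_FLAGS = {"Rank > 25", "SG Total < +0.67", "SG App < +0.84", "SG OTT < +0.60",
--                "SG App < +0", "SG OTT < +0"}
--
--
-- def _classify(f: str) -> tuple[int, str, str]:
--     """Priority/css/display for one stripped, non-empty flag token."""
--     display = _LABEL_MAP.get(f, f)
--     if "Injury" in f or "Concern" in f:
--         return (0, "br", display)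
--     if f in _STAT_FLAGS or any(k in f for k in ("SG App", "SG OTT", "SG Total", "Rank >")):
--         return (1, "br", _LABEL_MAP.get(f, (f[:11] + "..") if len(f) > 13 else f))
--     if len(display) > 13:
--         display = display[:11] + ".."
--     return (3, "ba", display)
--
--
-- def _flag_badges(flags_str: str, chalk: bool = False) -> str:
--     """Single pass: keep the first minimum-priority flag and a count; no list, no sort."""
--     best = None
--     count = 0
--     for raw in (flags_str.split(";") if flags_str else []):
--         f = raw.strip()
--         if not f:
--             continue
--         item = _classify(f)
--         count += 1
--         if best is None or item[0] < best[0]: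
--             best = item
--     if chalk:
--         count += 1
--         if best is None or 2 < best[0]:
--             best = (2, "ba", "CHALK")
--     if best is None:
--         return ""
--     _, cls, label = best
--     out = f'<span class="badge {cls}">{label}</span>'
--     if count > 1:
--         out += f'<span class="badge bg">+{count - 1}</span>'
--     return out
-- ===== Notes on version B (the rewrite author's own statement) =====
-- stated objective: alternative
-- what changed: B replaces A's build-a-list-then-stable-sort-and-take-head with a single pass that maintains the first minimum-priority flag (strict < keeps the first of a tie, matching the stable sort) and a running count.
import Mathlib
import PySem

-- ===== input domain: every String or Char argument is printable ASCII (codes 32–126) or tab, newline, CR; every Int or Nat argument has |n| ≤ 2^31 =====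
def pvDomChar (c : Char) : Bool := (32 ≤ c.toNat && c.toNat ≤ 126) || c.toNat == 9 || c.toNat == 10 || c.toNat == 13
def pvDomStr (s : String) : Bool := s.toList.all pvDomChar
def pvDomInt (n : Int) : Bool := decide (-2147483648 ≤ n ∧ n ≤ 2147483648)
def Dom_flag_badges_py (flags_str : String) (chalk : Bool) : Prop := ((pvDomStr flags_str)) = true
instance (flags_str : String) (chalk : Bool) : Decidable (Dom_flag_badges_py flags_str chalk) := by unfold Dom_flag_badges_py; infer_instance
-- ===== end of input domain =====

-- B replaces A's build-a-list-then-stable-sort-and-take-head with a single pass keeping the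
-- first minimum-priority flag and a count (alternative decomposition; same results).
-- ===== PORT A =====

-- _LABEL_MAP, as the dict literal builds it
def pvLabelMap : PySem.Dict String String :=
  ((((((((((PySem.Dict.empty.insert "SG App < +0.84" "APPROACH").insert "SG App < +0" "APPROACH").insert
    "SG OTT < +0.60" "OFF TEE").insert "SG OTT < +0" "OFF TEE").insert
    "SG Total < +0.67" "SG TOTAL").insert "Rank > 25" "WORLD RANK").insert
    "< 4 Career" "FEW WINS").insert "< 4 CAREER" "FEW WINS").insert
    "No Tune-Up" "TUNE-UP").insert "NO TUNE-UP" "TUNE-UP").insert "DNA/FORM GAP" "DNA/FORM GAP"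

-- STAT_FLAGS, a Python set literal
def pvStatFlags : PySem.Set String :=
  PySem.Set.ofList ["Rank > 25", "SG Total < +0.67", "SG App < +0.84", "SG OTT < +0.60",
                    "SG App < +0", "SG OTT < +0"]

def flag_badges_py (flags_str : String) (chalk : Bool) : String :=
  -- all_flags accumulation loop over flags_str.split(";")
  let all_flags : List (Int × String × String) :=
    if flags_str ≠ "" then
      ((PySem.Str.split? flags_str ";").getD []).foldl (fun acc f0 =>
        let f := PySem.Str.strip f0
        if f = "" then acc
        else
          let display := pvLabelMap.getD f f
          if PySem.Str.isIn "Injury" f || PySem.Str.isIn "Concern" f then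
            acc ++ [((0 : Int), "br", display)]
          else if pvStatFlags.contains f ||
              ["SG App", "SG OTT", "SG Total", "Rank >"].any (fun k => PySem.Str.isIn k f) then
            let display := pvLabelMap.getD f
              (if 13 < PySem.Str.len f then PySem.Str.slice f none (some 11) ++ ".." else f)
            acc ++ [((1 : Int), "br", display)]
          else
            let display := if 13 < PySem.Str.len display
                           then PySem.Str.slice display none (some 11) ++ ".." else display
            acc ++ [((3 : Int), "ba", display)]) []
    else []
  let all_flags := if chalk then all_flags ++ [((2 : Int), "ba", "CHALK")] else all_flags
  if all_flags = [] then ""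
  else
    -- all_flags.sort(key=lambda x: x[0]) — stable
    let all_flags := PySem.List.sorted all_flags (fun x => x.1) false
    match all_flags with
    | [] => ""   -- unreachable: the sort of a non-empty list is non-empty
    | (_, cls, label) :: _ =>
      let out := "<span class=\"badge " ++ cls ++ "\">" ++ label ++ "</span>"
      let extras := (all_flags.length : Int) - 1
      if 0 < extras then out ++ ("<span class=\"badge bg\">+" ++ PySem.Int.toStr extras ++ "</span>")
      else out

-- ===== PORT B =====

-- _classify(f) from Source B
def pvClassify (f : String) : Int × String × String :=
  let display := pvLabelMap.getD f f
  if PySem.Str.isIn "Injury" f || PySem.Str.isIn "Concern" f then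
    ((0 : Int), "br", display)
  else if pvStatFlags.contains f ||
      ["SG App", "SG OTT", "SG Total", "Rank >"].any (fun k => PySem.Str.isIn k f) then
    ((1 : Int), "br", pvLabelMap.getD f
      (if 13 < PySem.Str.len f then PySem.Str.slice f none (some 11) ++ ".." else f))
  else
    let display := if 13 < PySem.Str.len display
                   then PySem.Str.slice display none (some 11) ++ ".." else display
    ((3 : Int), "ba", display)

-- `if best is None or item[0] < best[0]: best = item`
def pvBestUpd (best : Option (Int × String × String)) (item : Int × String × String) :
    Option (Int × String × String) :=
  match best with
  | none => some item
  | some m => if item.1 < m.1 then some item else some m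

def flag_badges_py_alt (flags_str : String) (chalk : Bool) : String :=
  let pieces := if flags_str ≠ "" then (PySem.Str.split? flags_str ";").getD [] else []
  let st : Option (Int × String × String) × Int :=
    pieces.foldl (fun st raw =>
      let f := PySem.Str.strip raw
      if f = "" then st
      else (pvBestUpd st.1 (pvClassify f), st.2 + 1)) (none, 0)
  let st := if chalk then (pvBestUpd st.1 ((2 : Int), "ba", "CHALK"), st.2 + 1) else st
  match st.1 with
  | none => ""
  | some (_, cls, label) =>
    let out := "<span class=\"badge " ++ cls ++ "\">" ++ label ++ "</span>"
    if 1 < st.2 then out ++ ("<span class=\"badge bg\">+" ++ PySem.Int.toStr (st.2 - 1) ++ "</span>")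
    else out

-- ===== PRECONDITION & SPEC =====
def Spec_flag_badges_py (flags_str : String) (chalk : Bool) (out : String) : Prop := out = flag_badges_py_alt flags_str chalk
instance (flags_str : String) (chalk : Bool) (out : String) : Decidable (Spec_flag_badges_py flags_str chalk out) := by unfold Spec_flag_badges_py; infer_instance

-- ===== CLAIM (what is proved, stated in full; the proofs are below) =====
def Claim_equal_flag_badges_py : Prop := ∀ (flags_str : String) (chalk : Bool), Dom_flag_badges_py flags_str chalk → Spec_flag_badges_py flags_str chalk (flag_badges_py flags_str chalk)

-- ===== LEMMAS AND PROOFS =====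

-- head of an insertion step = strict-first-min update (no sortedness needed)
theorem pv_head_insertBy (x : Int × String × String) (ys : List (Int × String × String)) :
    (PySem.List.insertBy (fun a b => decide (a.1 < b.1)) x ys).head? =
      pvBestUpd ys.head? x := by
  cases ys with
  | nil => rfl
  | cons y t =>
    simp only [PySem.List.insertBy, pvBestUpd]
    by_cases h : x.1 < y.1 <;> simp [h]

-- head of the insertion-sort fold = fold of the strict-first-min update
theorem pv_head_sorted_fold (xs : List (Int × String × String)) :
    (PySem.List.sorted xs (fun x => x.1) false).head? = xs.foldl pvBestUpd none := by
  rw [PySem.List.sorted_eq_foldl_insertBy]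
  suffices h : ∀ (acc : List (Int × String × String)),
      (xs.foldl (fun acc x => PySem.List.insertBy (fun a b => decide (a.1 < b.1)) x acc) acc).head?
        = xs.foldl pvBestUpd acc.head? by
    simpa using h []
  induction xs with
  | nil => intro acc; rfl
  | cons x t ih =>
    intro acc
    simp only [List.foldl_cons, ih, pv_head_insertBy]

-- A's accumulation loop builds exactly the classified stripped non-empty tokens
theorem pv_itemsA (l : List String) (acc : List (Int × String × String)) :
    l.foldl (fun acc f0 =>
        let f := PySem.Str.strip f0
        if f = "" then acc
        else
          let display := pvLabelMap.getD f f
          if PySem.Str.isIn "Injury" f || PySem.Str.isIn "Concern" f then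
            acc ++ [((0 : Int), "br", display)]
          else if pvStatFlags.contains f ||
              ["SG App", "SG OTT", "SG Total", "Rank >"].any (fun k => PySem.Str.isIn k f) then
            let display := pvLabelMap.getD f
              (if 13 < PySem.Str.len f then PySem.Str.slice f none (some 11) ++ ".." else f)
            acc ++ [((1 : Int), "br", display)]
          else
            let display := if 13 < PySem.Str.len display
                           then PySem.Str.slice display none (some 11) ++ ".." else display
            acc ++ [((3 : Int), "ba", display)]) acc
      = acc ++ (l.filter (fun f0 => decide (¬ PySem.Str.strip f0 = ""))).map
          (fun f0 => pvClassify (PySem.Str.strip f0)) := by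
  have hstep : ∀ (acc : List (Int × String × String)) (f0 : String),
      (let f := PySem.Str.strip f0
       if f = "" then acc
       else
         let display := pvLabelMap.getD f f
         if PySem.Str.isIn "Injury" f || PySem.Str.isIn "Concern" f then
           acc ++ [((0 : Int), "br", display)]
         else if pvStatFlags.contains f ||
             ["SG App", "SG OTT", "SG Total", "Rank >"].any (fun k => PySem.Str.isIn k f) then
           let display := pvLabelMap.getD f
             (if 13 < PySem.Str.len f then PySem.Str.slice f none (some 11) ++ ".." else f)
           acc ++ [((1 : Int), "br", display)]
         else
           let display := if 13 < PySem.Str.len display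
                          then PySem.Str.slice display none (some 11) ++ ".." else display
           acc ++ [((3 : Int), "ba", display)])
        = if ¬ PySem.Str.strip f0 = "" then acc ++ [pvClassify (PySem.Str.strip f0)] else acc := by
    intro acc f0
    by_cases h0 : PySem.Str.strip f0 = ""
    · simp [h0]
    · rw [if_neg h0, if_pos h0]
      simp only [pvClassify]
      split_ifs <;> rfl
  have hfun := funext fun (acc : List (Int × String × String)) => funext fun f0 => hstep acc f0
  rw [hfun]
  exact PySem.List.foldl_append_ite _ _ l acc

-- B's single pass over the tokens computes (first-min fold, length) of the same item list
theorem pv_stateB (l : List String) :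
    l.foldl (fun st raw =>
        let f := PySem.Str.strip raw
        if f = "" then st
        else (pvBestUpd st.1 (pvClassify f), st.2 + 1))
      ((none : Option (Int × String × String)), (0 : Int))
    = (((l.filter (fun f0 => decide (¬ PySem.Str.strip f0 = ""))).map
          (fun f0 => pvClassify (PySem.Str.strip f0))).foldl pvBestUpd none,
       (((l.filter (fun f0 => decide (¬ PySem.Str.strip f0 = ""))).map
          (fun f0 => pvClassify (PySem.Str.strip f0))).length : Int)) := by
  have h1 : ∀ (st : Option (Int × String × String) × Int) (raw : String),
      (let f := PySem.Str.strip raw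
       if f = "" then st
       else (pvBestUpd st.1 (pvClassify f), st.2 + 1))
      = if ¬ PySem.Str.strip raw = "" then
          (pvBestUpd st.1 (pvClassify (PySem.Str.strip raw)), st.2 + 1)
        else st := by
    intro st raw
    by_cases h : PySem.Str.strip raw = "" <;> simp [h]
  have hfun := funext fun (st : Option (Int × String × String) × Int) => funext fun raw => h1 st raw
  rw [hfun, PySem.List.foldl_ite_eq_foldl_filter]
  rw [PySem.List.foldl_prod_mk
        (f := fun b raw => pvBestUpd b (pvClassify (PySem.Str.strip raw)))
        (g := fun c _ => c + 1)]
  simp only [Prod.mk.injEq]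
  constructor
  · exact (List.foldl_map (f := fun f0 => pvClassify (PySem.Str.strip f0)) (g := pvBestUpd)).symm
  · have := PySem.List.foldl_add (g := fun _ : String => (1 : Int))
      (l := (l.filter (fun f0 => decide (¬ PySem.Str.strip f0 = "")))) (a := (0 : Int))
    simp only [List.map_const', List.sum_replicate, nsmul_eq_mul, mul_one] at this
    rw [this, ← List.length_map (f := fun f0 => pvClassify (PySem.Str.strip f0))]
    omega

-- assembling the output: A's sort-head rendering = B's running-min rendering, for any item list
theorem pv_assemble (items : List (Int × String × String)) (chalk : Bool) :
    (if (if chalk = true then items ++ [((2 : Int), "ba", "CHALK")] else items) = [] then ""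
     else
       match PySem.List.sorted (if chalk = true then items ++ [((2 : Int), "ba", "CHALK")] else items)
           (fun x => x.1) false with
       | [] => ""
       | (_, cls, label) :: _ =>
         if 0 < ((PySem.List.sorted (if chalk = true then items ++ [((2 : Int), "ba", "CHALK")] else items)
               (fun x => x.1) false).length : Int) - 1 then
           "<span class=\"badge " ++ cls ++ "\">" ++ label ++ "</span>" ++
             ("<span class=\"badge bg\">+" ++
               PySem.Int.toStr
                 (((PySem.List.sorted (if chalk = true then items ++ [((2 : Int), "ba", "CHALK")] else items)
                     (fun x => x.1) false).length : Int) - 1) ++ "</span>")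
         else "<span class=\"badge " ++ cls ++ "\">" ++ label ++ "</span>")
    =
    (match (if chalk = true then
              (pvBestUpd (items.foldl pvBestUpd none) ((2 : Int), "ba", "CHALK"), (items.length : Int) + 1)
            else (items.foldl pvBestUpd none, (items.length : Int))).1 with
     | none => ""
     | some (_, cls, label) =>
       if 1 < (if chalk = true then
                 (pvBestUpd (items.foldl pvBestUpd none) ((2 : Int), "ba", "CHALK"), (items.length : Int) + 1)
               else (items.foldl pvBestUpd none, (items.length : Int))).2 then
         "<span class=\"badge " ++ cls ++ "\">" ++ label ++ "</span>" ++
           ("<span class=\"badge bg\">+" ++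
             PySem.Int.toStr
               ((if chalk = true then
                   (pvBestUpd (items.foldl pvBestUpd none) ((2 : Int), "ba", "CHALK"), (items.length : Int) + 1)
                 else (items.foldl pvBestUpd none, (items.length : Int))).2 - 1) ++ "</span>")
       else "<span class=\"badge " ++ cls ++ "\">" ++ label ++ "</span>") := by
  have hb : (if chalk = true then
        (pvBestUpd (items.foldl pvBestUpd none) ((2 : Int), "ba", "CHALK"), (items.length : Int) + 1)
      else (items.foldl pvBestUpd none, (items.length : Int)))
      = ((if chalk = true then items ++ [((2 : Int), "ba", "CHALK")] else items).foldl pvBestUpd none,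
         ((if chalk = true then items ++ [((2 : Int), "ba", "CHALK")] else items).length : Int)) := by
    cases chalk <;> simp [List.foldl_append, pvBestUpd]
  rw [hb]
  by_cases h0 : (if chalk = true then items ++ [((2 : Int), "ba", "CHALK")] else items) = []
  · rw [if_pos h0, h0]
    rfl
  · rw [if_neg h0]
    obtain ⟨m, t, hs⟩ := List.exists_cons_of_ne_nil
      (mt (PySem.List.sorted_eq_nil_iff
        (if chalk = true then items ++ [((2 : Int), "ba", "CHALK")] else items) (fun x => x.1) false).mp h0)
    have hh : (if chalk = true then items ++ [((2 : Int), "ba", "CHALK")] else items).foldl pvBestUpd none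
        = some m := by
      rw [← pv_head_sorted_fold, hs]; rfl
    rw [hs, hh]
    obtain ⟨p, cls, label⟩ := m
    dsimp only
    have hlen : ((((p, cls, label) :: t).length : Nat) : Int)
        = ((if chalk = true then items ++ [((2 : Int), "ba", "CHALK")] else items).length : Int) := by
      rw [← hs, PySem.List.length_sorted]
    rw [hlen]
    have hcond : (0 < ((if chalk = true then items ++ [((2 : Int), "ba", "CHALK")] else items).length : Int) - 1)
        ↔ (1 < ((if chalk = true then items ++ [((2 : Int), "ba", "CHALK")] else items).length : Int)) := by
      omega
    simp only [hcond]

-- ===== VERDICT (by name: the statement is the Claim_ definition above) =====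
theorem flag_badges_py_spec : Claim_equal_flag_badges_py := by
  intro flags_str chalk _
  unfold Spec_flag_badges_py flag_badges_py flag_badges_py_alt
  simp only [pv_itemsA, List.nil_append, pv_stateB]
  have hpush : (if flags_str ≠ "" then
        List.map (fun f0 => pvClassify (PySem.Str.strip f0))
          (List.filter (fun f0 => decide ¬PySem.Str.strip f0 = "")
            ((PySem.Str.split? flags_str ";").getD []))
      else []) =
      List.map (fun f0 => pvClassify (PySem.Str.strip f0))
        (List.filter (fun f0 => decide ¬PySem.Str.strip f0 = "")
          (if flags_str ≠ "" then (PySem.Str.split? flags_str ";").getD [] else [])) := by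
    by_cases h : flags_str = "" <;> simp [h]
  rw [hpush]
  exact pv_assemble _ chalk
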